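-- pv_equiv track=rewrite | github.com/KimPopsong/BAEKJOON | 1027.py | CountBuilding
-- ===== SOURCE A (Python) =====
-- def CountBuilding(inclines, start):
--     rightNode = start + 1
--     leftNode = start - 1
--
--     rightCount = 0
--     leftCount = 0
--
--     if rightNode >= len(inclines):
--         rightIncline = 0
--
--     else:
--         rightIncline = inclines[rightNode]
--         rightCount += 1
--
--     if leftNode < 0:
--         leftIncline = 0
--
--     else:
--         leftIncline = inclines[leftNode]
--         leftCount += 1
--
--     for i in range(leftNode, -1, -1):
--         if leftIncline > inclines[i]:
--             leftCount += 1
--             leftIncline = inclines[i]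
--
--     for i in range(rightNode, len(inclines)):
--         if rightIncline < inclines[i]:
--             rightCount += 1
--             rightIncline = inclines[i]
--
--     return leftCount + rightCount
-- ===== SOURCE B (Python) =====
-- def _visible(seq, pick):
--     if not seq:
--         return 0
--     run = []
--     cur = seq[0]
--     for x in seq:
--         cur = pick(cur, x)
--         run.append(cur)
--     return 1 + sum(1 for a, b in zip(run, run[1:]) if a != b)
--
--
-- def CountBuilding(inclines, start):
--     left = inclines[:start][::-1] if start >= 1 else []
--     right = inclines[start + 1:]
--     return _visible(left, min) + _visible(right, max)
-- ===== Notes on version B (the rewrite author's own statement) =====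
-- stated objective: alternative
-- what changed: B decomposes the problem into explicit left/right subsequences built by slicing, then one shared helper builds the running-extremum list (min leftward, max rightward) and counts adjacent changes, replacing A's two inline threshold-update loops over index ranges.
-- outside the precondition, e.g. on CountBuilding([3, 1], -2): A returns 2, B returns 1; on CountBuilding([3, 1], 3): A raises IndexError, B returns 1
import Mathlib
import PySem

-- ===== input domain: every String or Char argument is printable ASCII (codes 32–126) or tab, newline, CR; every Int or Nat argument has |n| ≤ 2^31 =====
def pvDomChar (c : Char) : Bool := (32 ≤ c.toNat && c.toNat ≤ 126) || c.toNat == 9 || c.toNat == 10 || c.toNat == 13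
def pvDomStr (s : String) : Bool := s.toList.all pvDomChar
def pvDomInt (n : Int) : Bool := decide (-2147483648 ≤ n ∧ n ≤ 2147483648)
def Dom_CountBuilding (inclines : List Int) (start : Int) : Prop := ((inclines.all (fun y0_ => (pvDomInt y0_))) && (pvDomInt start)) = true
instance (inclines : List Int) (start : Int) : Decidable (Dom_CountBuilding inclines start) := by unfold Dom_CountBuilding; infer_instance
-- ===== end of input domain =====

-- B rebuilds the answer from explicit left/right slices and one shared running-extremum helper; objective: alternative decomposition (same cost).

-- ===== PORT A =====
def CountBuilding (inclines : List Int) (start : Int) : Int :=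
  let rightNode := start + 1
  let leftNode := start - 1
  let rInit : Int × Int :=           -- (rightCount, rightIncline)
    if rightNode ≥ (inclines.length : Int) then (0, 0)
    else (0 + 1, PySem.List.pyGetD inclines rightNode 0)
  let lInit : Int × Int :=           -- (leftCount, leftIncline)
    if leftNode < 0 then (0, 0)
    else (0 + 1, PySem.List.pyGetD inclines leftNode 0)
  let lState := (PySem.List.pyRange leftNode (-1) (-1)).foldl
    (fun (st : Int × Int) i =>
      if PySem.List.pyGetD inclines i 0 < st.2 then (st.1 + 1, PySem.List.pyGetD inclines i 0) else st)
    lInit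
  let rState := (PySem.List.pyRange rightNode (inclines.length : Int) 1).foldl
    (fun (st : Int × Int) i =>
      if st.2 < PySem.List.pyGetD inclines i 0 then (st.1 + 1, PySem.List.pyGetD inclines i 0) else st)
    rInit
  lState.1 + rState.1

-- ===== PORT B =====
def CountBuilding_visible (seq : List Int) (pick : Int → Int → Int) : Int :=
  match seq with
  | [] => 0
  | h :: _ =>
    let run := (seq.foldl (fun (s : List Int × Int) x =>
        let cur := pick s.2 x
        (s.1 ++ [cur], cur)) ([], h)).1
    1 + (((run.zip run.tail).countP (fun p => decide (p.1 ≠ p.2)) : Nat) : Int)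

def CountBuilding_alt (inclines : List Int) (start : Int) : Int :=
  -- inclines[:start][::-1]  ([::-1] is List.reverse, PySem.List.slice?_none_none_neg_one)
  let left := if 1 ≤ start then (PySem.List.slice inclines none (some start)).reverse else []
  let right := PySem.List.slice inclines (some (start + 1)) none
  CountBuilding_visible left min + CountBuilding_visible right max

-- ===== PRECONDITION & SPEC =====
-- Pre_ excludes start > len(inclines), where A raises IndexError, and negative starts below -1,
-- where A's value comes from Python's accidental negative-index wraparound; start = -1 stays
-- admitted because there both programs see an empty left side and the whole list on the right.
def Pre_CountBuilding (inclines : List Int) (start : Int) : Prop :=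
  (0 ≤ start ∧ start ≤ (inclines.length : Int)) ∨ start = -1
instance (inclines : List Int) (start : Int) : Decidable (Pre_CountBuilding inclines start) := by
  unfold Pre_CountBuilding; infer_instance

def pvWitness_CountBuilding : List Int × Int := ([1, 2, 1], 1)

def Spec_CountBuilding (inclines : List Int) (start : Int) (out : Int) : Prop := out = CountBuilding_alt inclines start
instance (inclines : List Int) (start : Int) (out : Int) : Decidable (Spec_CountBuilding inclines start out) := by unfold Spec_CountBuilding; infer_instance

-- ===== CLAIM (what is proved, stated in full; the proofs are below) =====
def Claim_equal_CountBuilding : Prop := ∀ (inclines : List Int) (start : Int), Dom_CountBuilding inclines start → Pre_CountBuilding inclines start → Spec_CountBuilding inclines start (CountBuilding inclines start)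

-- ===== LEMMAS AND PROOFS =====

-- A's loop body, abstracted over the comparison relation.
def pvStep (r : Int → Int → Prop) [DecidableRel r] (st : Int × Int) (x : Int) : Int × Int :=
  if r st.2 x then (st.1 + 1, x) else st

-- number of strict improvements along the list, starting threshold cur
def pvZ (r : Int → Int → Prop) [DecidableRel r] : Int → List Int → Int
  | _, [] => 0
  | cur, x :: t => if r cur x then 1 + pvZ r x t else pvZ r cur t

lemma pvA_fold (r : Int → Int → Prop) [DecidableRel r] (t : List Int) :
    ∀ (c cur : Int), (t.foldl (pvStep r) (c, cur)).1 = c + pvZ r cur t := by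
  induction t with
  | nil => intro c cur; simp [pvZ]
  | cons x t ih =>
    intro c cur
    by_cases h : r cur x <;> simp [pvStep, pvZ, h, ih]
    omega

-- B's run-building loop
def pvRunFrom (pick : Int → Int → Int) : Int → List Int → List Int
  | _, [] => []
  | cur, x :: t => pick cur x :: pvRunFrom pick (pick cur x) t

lemma pvRun_fold (pick : Int → Int → Int) (t : List Int) :
    ∀ (acc : List Int) (cur : Int),
      (t.foldl (fun (s : List Int × Int) x =>
        let c := pick s.2 x
        (s.1 ++ [c], c)) (acc, cur)).1 = acc ++ pvRunFrom pick cur t := by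
  induction t with
  | nil => intro acc cur; simp [pvRunFrom]
  | cons x t ih => intro acc cur; simp [pvRunFrom, ih]

def pvAdj (l : List Int) : Int := (((l.zip l.tail).countP (fun p => decide (p.1 ≠ p.2)) : Nat) : Int)

lemma pvAdj_run (r : Int → Int → Prop) [DecidableRel r] (pick : Int → Int → Int)
    (h1 : ∀ c x, r c x → pick c x = x) (h2 : ∀ c x, ¬ r c x → pick c x = c)
    (h3 : ∀ c x, r c x → x ≠ c) :
    ∀ (t : List Int) (cur : Int), pvAdj (cur :: pvRunFrom pick cur t) = pvZ r cur t := by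
  intro t
  induction t with
  | nil => intro cur; simp [pvRunFrom, pvAdj, pvZ]
  | cons x t ih =>
    intro cur
    by_cases h : r cur x
    · have hx := h1 _ _ h
      have hne := h3 _ _ h
      have ihx := ih x
      simp only [pvRunFrom, pvZ, hx, if_pos h]
      simp [pvAdj, Ne.symm hne] at ihx ⊢
      omega
    · have hx := h2 _ _ h
      have ihc := ih cur
      simp only [pvRunFrom, pvZ, hx, if_neg h]
      simp [pvAdj] at ihc ⊢
      omega

lemma pvVisible_eq (r : Int → Int → Prop) [DecidableRel r] (pick : Int → Int → Int)
    (h1 : ∀ c x, r c x → pick c x = x) (h2 : ∀ c x, ¬ r c x → pick c x = c)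
    (h3 : ∀ c x, r c x → x ≠ c) (hrefl : ∀ c, ¬ r c c)
    (h : Int) (t : List Int) :
    CountBuilding_visible (h :: t) pick = 1 + pvZ r h t := by
  have hpick : pick h h = h := h2 _ _ (hrefl h)
  have hrun := pvRun_fold pick t [pick h h] (pick h h)
  have hadj := pvAdj_run r pick h1 h2 h3 t h
  simp only [pvAdj, List.tail_cons] at hadj
  simp only [CountBuilding_visible, List.foldl_cons, List.nil_append]
  rw [hrun, hpick, List.singleton_append, List.tail_cons, hadj]

-- A's fold over the index range equals the abstract fold over the corresponding element list.
lemma pvMap_range_right (L : List Int) (a : Nat) :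
    (PySem.List.pyRange (a : Int) (L.length : Int) 1).map (fun i => PySem.List.pyGetD L i 0)
      = L.drop a := by
  apply List.ext_getElem
  · simp [PySem.List.length_pyRange_one]
  · intro k hk1 hk2
    have hklen : a + k < L.length := by
      simp [PySem.List.length_pyRange_one] at hk1; omega
    simp only [List.getElem_map, PySem.List.getElem_pyRange_one]
    have : (a : Int) + (k : Int) = ((a + k : Nat) : Int) := by omega
    rw [this, PySem.List.pyGetD_natCast]
    simp [List.getD_eq_getElem?_getD, hklen]

lemma pvMap_range_left (L : List Int) :
    ∀ (s : Nat), s ≤ L.length →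
    (PySem.List.pyRange ((s : Int) - 1) (-1) (-1)).map (fun i => PySem.List.pyGetD L i 0)
      = (L.take s).reverse := by
  intro s
  induction s with
  | zero => intro _; rw [PySem.List.pyRange_neg_one_eq_nil (by norm_num)]; simp
  | succ n ih =>
    intro hs
    have hn : n < L.length := by omega
    have hcons : PySem.List.pyRange (((n + 1 : Nat) : Int) - 1) (-1) (-1)
        = ((n : Int)) :: PySem.List.pyRange ((n : Int) - 1) (-1) (-1) := by
      have : ((n + 1 : Nat) : Int) - 1 = (n : Int) := by push_cast; ring
      rw [this, PySem.List.pyRange_neg_one_cons (by omega)]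
    rw [hcons]
    simp only [List.map_cons, ih (by omega)]
    rw [PySem.List.pyGetD_natCast]
    have htake : (L.take (n + 1)).reverse = L[n] :: (L.take n).reverse := by
      rw [List.take_add_one, List.getElem?_eq_getElem hn]
      simp
    rw [htake]
    simp [List.getD_eq_getElem?_getD, List.getElem?_eq_getElem hn]

-- the two concrete relations
lemma pv_r_right : ∀ c x : Int, (c < x → max c x = x) ∧ (¬ c < x → max c x = c) ∧ (c < x → x ≠ c) := by
  intro c x
  refine ⟨fun h => ?_, fun h => ?_, fun h => by omega⟩ <;> simp [max_def] <;> omega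

lemma pv_r_left : ∀ c x : Int, (x < c → min c x = x) ∧ (¬ x < c → min c x = c) ∧ (x < c → x ≠ c) := by
  intro c x
  refine ⟨fun h => ?_, fun h => ?_, fun h => by omega⟩ <;> simp [min_def] <;> omega

-- one whole side, as it appears in A, equals B's visible count on the element list
lemma pvSide_eq (r : Int → Int → Prop) [DecidableRel r] (pick : Int → Int → Int)
    (h1 : ∀ c x, r c x → pick c x = x) (h2 : ∀ c x, ¬ r c x → pick c x = c)
    (h3 : ∀ c x, r c x → x ≠ c) (hrefl : ∀ c, ¬ r c c)
    (h : Int) (t : List Int) :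
    ((h :: t).foldl (pvStep r) (0 + 1, h)).1 = CountBuilding_visible (h :: t) pick := by
  rw [pvVisible_eq r pick h1 h2 h3 hrefl]
  simp only [List.foldl_cons, pvStep, if_neg (hrefl h)]
  rw [pvA_fold]
  ring

-- the whole right-hand side of A, for an arbitrary nonnegative start index a, equals B's visible count on the suffix
lemma pvRightSide (L : List Int) (a : Nat) :
    ((PySem.List.pyRange ((a : Nat) : Int) (L.length : Int) 1).foldl
      (fun (st : Int × Int) i =>
        if st.2 < PySem.List.pyGetD L i 0 then (st.1 + 1, PySem.List.pyGetD L i 0) else st)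
      (if ((a : Nat) : Int) ≥ (L.length : Int) then ((0 : Int), (0 : Int)) else (0 + 1, PySem.List.pyGetD L ((a : Nat) : Int) 0))).1
    = CountBuilding_visible (L.drop a) max := by
  have hRmap := pvMap_range_right L a
  by_cases hge : L.length ≤ a
  · rw [if_pos (by exact_mod_cast hge)]
    rw [PySem.List.pyRange_one_eq_nil (by exact_mod_cast hge)]
    rw [List.drop_eq_nil_of_le hge]
    simp [CountBuilding_visible]
  · have hlt : a < L.length := by omega
    rw [if_neg (by omega)]
    have hfold : (PySem.List.pyRange ((a : Nat) : Int) (L.length : Int) 1).foldl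
        (fun (st : Int × Int) i =>
          if st.2 < PySem.List.pyGetD L i 0 then (st.1 + 1, PySem.List.pyGetD L i 0) else st) (0 + 1, PySem.List.pyGetD L ((a : Nat) : Int) 0)
        = (L.drop a).foldl (pvStep (fun c x => c < x)) (0 + 1, PySem.List.pyGetD L ((a : Nat) : Int) 0) := by
      rw [← hRmap, List.foldl_map]
      rfl
    rw [hfold]
    have hhead : L.drop a = L[a] :: L.drop (a + 1) := by
      rw [List.drop_eq_getElem_cons hlt]
    have hincl : PySem.List.pyGetD L ((a : Nat) : Int) 0 = L[a] := by
      rw [PySem.List.pyGetD_natCast]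
      simp [List.getD_eq_getElem?_getD, List.getElem?_eq_getElem hlt]
    rw [hhead, hincl]
    exact pvSide_eq (fun c x => c < x) max
      (fun c x h => (pv_r_right c x).1 h) (fun c x h => (pv_r_right c x).2.1 h)
      (fun c x h => (pv_r_right c x).2.2 h) (fun c => lt_irrefl c)
      L[a] (L.drop (a + 1))

-- ===== VERDICT (by name: the statement is the Claim_ definition above) =====
theorem CountBuilding_spec : Claim_equal_CountBuilding := by
  intro L start _ hpre
  unfold Spec_CountBuilding CountBuilding CountBuilding_alt
  rcases hpre with ⟨hs0, hsn⟩ | hm1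
  · obtain ⟨s, rfl⟩ : ∃ s : Nat, start = (s : Int) := ⟨start.toNat, (Int.toNat_of_nonneg hs0).symm⟩
    have hslen : s ≤ L.length := by exact_mod_cast hsn
    simp only []
    have hleft : (PySem.List.slice L none (some (s : Int))).reverse = (L.take s).reverse := by
      rw [PySem.List.slice_to_natCast]
    have hright : PySem.List.slice L (some ((s : Int) + 1)) none = L.drop (s + 1) := by
      have : (s : Int) + 1 = ((s + 1 : Nat) : Int) := by push_cast; ring
      rw [this, PySem.List.slice_from_natCast]
    rw [hleft, hright]
    -- LEFT side
    have hLmap := pvMap_range_left L s hslen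
    have hleftfold :
        ((PySem.List.pyRange ((s : Int) - 1) (-1) (-1)).foldl
          (fun (st : Int × Int) i =>
            if PySem.List.pyGetD L i 0 < st.2 then (st.1 + 1, PySem.List.pyGetD L i 0) else st)
          (if (s : Int) - 1 < 0 then ((0 : Int), (0 : Int)) else (0 + 1, PySem.List.pyGetD L ((s : Int) - 1) 0))).1
        = CountBuilding_visible (if 1 ≤ (s : Int) then (L.take s).reverse else []) min := by
      rcases Nat.eq_zero_or_pos s with hz | hpos
      · subst hz
        rw [if_neg (by norm_num : ¬ (1 : Int) ≤ ((0 : Nat) : Int))]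
        rw [PySem.List.pyRange_neg_one_eq_nil (by norm_num)]
        simp [CountBuilding_visible]
      · obtain ⟨m, rfl⟩ : ∃ m, s = m + 1 := ⟨s - 1, by omega⟩
        rw [if_pos (by push_cast; omega : (1 : Int) ≤ ((m + 1 : Nat) : Int))]
        have hm : m < L.length := by omega
        have hcast : ((m + 1 : Nat) : Int) - 1 = ((m : Nat) : Int) := by omega
        have hne : ¬ (((m + 1 : Nat) : Int) - 1 < 0) := by omega
        rw [if_neg hne]
        have hfold : (PySem.List.pyRange (((m + 1 : Nat) : Int) - 1) (-1) (-1)).foldl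
            (fun (st : Int × Int) i =>
              if PySem.List.pyGetD L i 0 < st.2 then (st.1 + 1, PySem.List.pyGetD L i 0) else st) (0 + 1, PySem.List.pyGetD L (((m + 1 : Nat) : Int) - 1) 0)
            = ((L.take (m + 1)).reverse).foldl (pvStep (fun c x => x < c)) (0 + 1, PySem.List.pyGetD L (((m + 1 : Nat) : Int) - 1) 0) := by
          rw [← hLmap, List.foldl_map]
          rfl
        rw [hfold]
        have hhead : (L.take (m + 1)).reverse = L[m] :: (L.take m).reverse := by
          rw [List.take_add_one, List.getElem?_eq_getElem hm]
          simp
        have hincl : PySem.List.pyGetD L (((m + 1 : Nat) : Int) - 1) 0 = L[m] := by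
          rw [hcast, PySem.List.pyGetD_natCast]
          simp [List.getD_eq_getElem?_getD, List.getElem?_eq_getElem hm]
        rw [hhead, hincl]
        exact pvSide_eq (fun c x => x < c) min
          (fun c x h => (pv_r_left c x).1 h) (fun c x h => (pv_r_left c x).2.1 h)
          (fun c x h => (pv_r_left c x).2.2 h) (fun c => lt_irrefl c)
          L[m] (L.take m).reverse
    rw [hleftfold]
    -- RIGHT side: rewrite ↑s + 1 into ↑(s + 1) and use pvRightSide
    have hc : (s : Int) + 1 = ((s + 1 : Nat) : Int) := by push_cast; ring
    rw [hc, pvRightSide L (s + 1)]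
  · subst hm1
    simp only []
    rw [if_neg (by norm_num : ¬ (1 : Int) ≤ (-1 : Int))]
    have hlz : ((PySem.List.pyRange ((-1 : Int) - 1) (-1) (-1)).foldl
          (fun (st : Int × Int) i =>
            if PySem.List.pyGetD L i 0 < st.2 then (st.1 + 1, PySem.List.pyGetD L i 0) else st)
          (if (-1 : Int) - 1 < 0 then ((0 : Int), (0 : Int)) else (0 + 1, PySem.List.pyGetD L ((-1 : Int) - 1) 0))).1
        = (0 : Int) := by
      rw [if_pos (by norm_num : (-1 : Int) - 1 < 0)]
      rw [PySem.List.pyRange_neg_one_eq_nil (by norm_num)]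
      rfl
    rw [hlz]
    rw [(by norm_num : (-1 : Int) + 1 = ((0 : Nat) : Int))]
    rw [PySem.List.slice_from_natCast, pvRightSide L 0]
    simp [CountBuilding_visible]
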